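-- pv_equiv track=rewrite | github.com/axiros/docutools | src/lcdoc/mkdocs/markdown.py | line_sep_before_code
-- ===== SOURCE A (Python) =====
-- def line_sep_before_code(ls):
--     """for markdown"""
--     r, is_code = [], False
--     for ln in ls:
--         if not is_code:
--             if ln.startswith('    '):
--                 r.append('')
--                 is_code = True
--         else:
--             if not ln.startswith('    '):
--                 is_code = False
--         r.append(ln)
--     return r
-- ===== SOURCE B (Python) =====
-- from itertools import groupby
--
--
-- def line_sep_before_code(ls):
--     """for markdown"""
--     r = []
--     for is_code, group in groupby(ls, key=lambda ln: ln.startswith('    ')):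
--         if is_code:
--             r.append('')
--         r.extend(group)
--     return r
-- ===== Notes on version B (the rewrite author's own statement) =====
-- stated objective: idiomatic
-- what changed: Replaced the explicit is_code boolean state machine with itertools.groupby run-grouping: lines are grouped into maximal runs by whether they start with four spaces, and a blank line is emitted once before each code run.
import Mathlib
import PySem

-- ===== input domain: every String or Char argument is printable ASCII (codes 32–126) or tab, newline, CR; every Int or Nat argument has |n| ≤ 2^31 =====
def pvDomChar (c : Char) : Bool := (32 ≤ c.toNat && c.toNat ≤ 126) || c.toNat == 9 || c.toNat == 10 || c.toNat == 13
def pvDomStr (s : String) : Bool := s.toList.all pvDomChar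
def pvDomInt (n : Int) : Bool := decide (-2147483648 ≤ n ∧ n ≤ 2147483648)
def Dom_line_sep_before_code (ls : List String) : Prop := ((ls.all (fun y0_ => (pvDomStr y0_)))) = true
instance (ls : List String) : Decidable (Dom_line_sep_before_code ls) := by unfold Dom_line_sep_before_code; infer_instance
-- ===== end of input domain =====

-- B replaces A's is_code boolean state machine by grouping lines into maximal runs
-- (by whether they start with four spaces) and emitting one blank line before each
-- code run (objective: idiomatic).


-- ===== PORT A =====
-- one step of A's loop over the state (r, is_code)
def lsbcStepA (st : List String × Bool) (ln : String) : List String × Bool :=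
  let st' :=
    if !st.2 then
      if PySem.Str.startswith ln "    " then (st.1 ++ [""], true) else (st.1, st.2)
    else
      if !(PySem.Str.startswith ln "    ") then (st.1, false) else (st.1, st.2)
  (st'.1 ++ [ln], st'.2)

def line_sep_before_code (ls : List String) : List String :=
  (ls.foldl lsbcStepA ([], false)).1

-- ===== PORT B =====
-- the groupby key
def lsbcKey (ln : String) : Bool := PySem.Str.startswith ln "    "

-- itertools.groupby: maximal runs of equal key, as (key, run) pairs
def lsbcGroups : List String → List (Bool × List String)
  | [] => []
  | x :: xs =>
    let k := lsbcKey x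
    let g := xs.takeWhile (fun y => lsbcKey y == k)
    let rest := xs.dropWhile (fun y => lsbcKey y == k)
    (k, x :: g) :: lsbcGroups rest
termination_by ls => ls.length
decreasing_by
  simp only [List.length_cons]
  exact Nat.lt_succ_of_le (List.length_dropWhile_le _ _)

def line_sep_before_code_alt (ls : List String) : List String :=
  (lsbcGroups ls).foldl
    (fun r g => (r ++ (if g.1 then [""] else [])) ++ g.2) []

-- ===== PRECONDITION & SPEC =====
def Spec_line_sep_before_code (ls : List String) (out : List String) : Prop := out = line_sep_before_code_alt ls
instance (ls : List String) (out : List String) : Decidable (Spec_line_sep_before_code ls out) := by unfold Spec_line_sep_before_code; infer_instance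

-- ===== CLAIM (what is proved, stated in full; the proofs are below) =====
def Claim_equal_line_sep_before_code : Prop := ∀ (ls : List String), Dom_line_sep_before_code ls → Spec_line_sep_before_code ls (line_sep_before_code ls)

-- ===== LEMMAS AND PROOFS =====

-- the output A produces from state is_code = b, accumulator-free
def lsbcOut (b : Bool) : List String → List String
  | [] => []
  | ln :: rest =>
    let c := lsbcKey ln
    if b then ln :: lsbcOut c rest
    else if c then "" :: ln :: lsbcOut c rest else ln :: lsbcOut c rest

theorem lsbc_foldlA (ls : List String) : ∀ (b : Bool) (r : List String),
    (ls.foldl lsbcStepA (r, b)).1 = r ++ lsbcOut b ls := by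
  induction ls with
  | nil => intro b r; simp [lsbcOut]
  | cons ln rest ih =>
    intro b r
    simp only [List.foldl_cons]
    by_cases h : PySem.Chars.startswith ln.toList [' ', ' ', ' ', ' '] = true <;>
      cases b <;>
      simp [lsbcStepA, lsbcOut, lsbcKey, PySem.Str.startswith, h, ih]

theorem lsbc_foldlB (gs : List (Bool × List String)) : ∀ (r : List String),
    gs.foldl (fun r g => (r ++ (if g.1 then [""] else [])) ++ g.2) r
      = r ++ gs.flatMap (fun g => (if g.1 then [""] else []) ++ g.2) := by
  induction gs with
  | nil => intro r; simp
  | cons g gs ih => intro r; simp [List.flatMap]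

-- pushing a uniform run through lsbcOut
theorem lsbc_out_run (k : Bool) (g : List String) (h : ∀ y ∈ g, lsbcKey y = k) :
    ∀ rest, lsbcOut k (g ++ rest) = g ++ lsbcOut k rest := by
  induction g with
  | nil => intro rest; rfl
  | cons y g ih =>
    intro rest
    have hy : lsbcKey y = k := h y (by simp)
    have hg : ∀ z ∈ g, lsbcKey z = k := fun z hz => h z (by simp [hz])
    cases k with
    | false => simp [lsbcOut, hy, ih hg]
    | true => simp [lsbcOut, hy, ih hg]

-- when the head (if any) is not code, starting state does not matter
theorem lsbc_out_switch (rest : List String)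
    (h : ∀ y ∈ rest.head?, lsbcKey y = false) :
    lsbcOut true rest = lsbcOut false rest := by
  cases rest with
  | nil => rfl
  | cons y t =>
    have hy : lsbcKey y = false := h y (by simp)
    simp [lsbcOut, hy]

theorem lsbc_head_dropWhile (p : String → Bool) (l : List String) :
    ∀ y ∈ (l.dropWhile p).head?, p y = false := by
  induction l with
  | nil => simp
  | cons x t ih =>
    by_cases h : p x = true
    · simpa [h] using ih
    · simp only [Bool.not_eq_true] at h
      simp [List.dropWhile_cons, h]

theorem lsbc_main_aux (n : Nat) : ∀ (ls : List String), ls.length ≤ n →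
    (lsbcGroups ls).flatMap (fun g => (if g.1 then [""] else []) ++ g.2)
      = lsbcOut false ls := by
  induction n with
  | zero =>
    intro ls hls
    have : ls = [] := List.eq_nil_of_length_eq_zero (Nat.le_zero.mp hls)
    subst this
    simp [lsbcGroups, lsbcOut]
  | succ n ih =>
    intro ls hls
    cases ls with
    | nil => simp [lsbcGroups, lsbcOut]
    | cons x xs =>
      rw [lsbcGroups]
      simp only [List.flatMap_cons]
      have hlen : (xs.dropWhile (fun y => lsbcKey y == lsbcKey x)).length ≤ n := by
        have h1 := List.length_dropWhile_le (fun y => lsbcKey y == lsbcKey x) xs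
        have h2 : xs.length ≤ n := by simpa using Nat.lt_succ_iff.mp (Nat.lt_of_lt_of_le (by simp) hls)
        omega
      rw [ih _ hlen]
      have hg : ∀ y ∈ xs.takeWhile (fun y => lsbcKey y == lsbcKey x), lsbcKey y = lsbcKey x := by
        intro y hy
        simpa using List.mem_takeWhile_imp hy
      have hspan : xs = xs.takeWhile (fun y => lsbcKey y == lsbcKey x)
          ++ xs.dropWhile (fun y => lsbcKey y == lsbcKey x) :=
        (List.takeWhile_append_dropWhile).symm
      have hrest := lsbc_head_dropWhile (fun y => lsbcKey y == lsbcKey x) xs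
      cases hk : lsbcKey x with
      | false =>
        rw [hk] at hg hspan
        conv_rhs => rw [hspan]
        simp only [lsbcOut, hk, Bool.false_eq_true, if_false]
        rw [lsbc_out_run false _ hg]
        simp
      | true =>
        rw [hk] at hg hspan hrest
        have hsw : lsbcOut true (xs.dropWhile (fun y => lsbcKey y == true))
            = lsbcOut false (xs.dropWhile (fun y => lsbcKey y == true)) := by
          apply lsbc_out_switch
          intro y hy
          have := hrest y hy
          simpa using this
        conv_rhs => rw [hspan]
        simp only [lsbcOut, hk, Bool.false_eq_true, if_false, if_true]
        rw [lsbc_out_run true _ hg, hsw]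
        simp

theorem lsbc_main (ls : List String) :
    (lsbcGroups ls).flatMap (fun g => (if g.1 then [""] else []) ++ g.2)
      = lsbcOut false ls :=
  lsbc_main_aux ls.length ls (Nat.le_refl _)

-- ===== VERDICT (by name: the statement is the Claim_ definition above) =====
theorem line_sep_before_code_spec : Claim_equal_line_sep_before_code := by
  intro ls _
  unfold Spec_line_sep_before_code line_sep_before_code line_sep_before_code_alt
  rw [lsbc_foldlA, lsbc_foldlB, lsbc_main]
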